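-- pv_equiv track=rewrite | github.com/job-agent/job-agent-platform | packages/telegram_bot/src/telegram_bot/handlers/search/formatter.py | _format_2d_skills
-- ===== SOURCE A (Python) =====
-- def _format_2d_skills(skills: list[list[str]], max_skills: int = 10) -> str:
--     """Format 2D skill structure for display.
--
--     Skills within inner lists (OR groups) are joined with " or ".
--     Groups are joined with ", ".
--     Total skill count is limited to max_skills, with remainder shown.
--
--     Args:
--         skills: 2D list where outer list = AND groups, inner lists = OR alternatives
--         max_skills: Maximum number of individual skills to display
--
--     Returns:
--         Formatted string like "JavaScript or Python, React, Docker or Kubernetes"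
--     """
--     if not skills:
--         return ""
--
--     # Count total individual skills and format groups
--     total_count = 0
--     formatted_groups = []
--
--     for group in skills:
--         if not group:
--             continue
--
--         # Count skills in this group
--         group_size = len(group)
--         remaining_budget = max_skills - total_count
--
--         if remaining_budget <= 0:
--             break
--
--         if group_size <= remaining_budget:
--             # Include entire group
--             formatted_groups.append(" or ".join(group))
--             total_count += group_size
--         else:
--             # Partial group - take only what fits
--             formatted_groups.append(" or ".join(group[:remaining_budget]))
--             total_count += remaining_budget
--             break
--
--     result = ", ".join(formatted_groups)
--
--     # Calculate total skills across all groups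
--     total_all = sum(len(group) for group in skills)
--     if total_all > max_skills:
--         result += f" ... and {total_all - total_count} more"
--
--     return result
-- ===== SOURCE B (Python) =====
-- def _format_2d_skills(skills: list[list[str]], max_skills: int = 10) -> str:
--     """Flat-slice rewrite: enumerate skills into (group_index, skill) pairs,
--     slice the first max(0, max_skills), and rebuild OR-groups as consecutive runs."""
--     if not skills:
--         return ""
--     flat = [(i, s) for i, g in enumerate(skills) for s in g]
--     shown = flat[:max(0, max_skills)]
--     runs = []
--     rest = shown
--     while rest:
--         key = rest[0][0]
--         j = 0
--         while j < len(rest) and rest[j][0] == key: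
--             j += 1
--         runs.append([s for _, s in rest[:j]])
--         rest = rest[j:]
--     result = ", ".join(" or ".join(run) for run in runs)
--     if len(flat) > max_skills:
--         result += f" ... and {len(flat) - len(shown)} more"
--     return result
-- ===== Notes on version B (the rewrite author's own statement) =====
-- stated objective: alternative
-- what changed: Replaces A's budget-tracking loop with break/continue and whole-vs-partial group cases by a flat list of (group_index, skill) pairs, a single clamped slice of the first max(0, max_skills) pairs, and a regrouping of that slice into consecutive same-index runs; the 'more' remainder is computed from list lengths instead of loop state.
import Mathlib
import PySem

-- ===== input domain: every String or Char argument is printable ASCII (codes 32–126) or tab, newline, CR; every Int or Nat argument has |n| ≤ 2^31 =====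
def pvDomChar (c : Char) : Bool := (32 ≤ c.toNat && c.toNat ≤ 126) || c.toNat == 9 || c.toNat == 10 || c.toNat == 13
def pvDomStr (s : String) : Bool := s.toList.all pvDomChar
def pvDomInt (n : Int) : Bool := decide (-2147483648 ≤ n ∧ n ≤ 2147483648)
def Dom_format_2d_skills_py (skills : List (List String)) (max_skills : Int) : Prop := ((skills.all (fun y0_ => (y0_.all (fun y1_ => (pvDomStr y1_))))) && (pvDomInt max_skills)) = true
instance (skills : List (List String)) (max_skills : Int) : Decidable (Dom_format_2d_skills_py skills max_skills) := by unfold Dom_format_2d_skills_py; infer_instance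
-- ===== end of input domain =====

-- B replaces A's budget-tracking loop by a flat slice of (group index, skill) pairs
-- regrouped into consecutive runs; objective: alternative decomposition (same cost).

-- ===== PORT A =====
-- A's for-loop with `continue`/`break`, state (total_count, formatted_groups)
def fmtLoopA (groups : List (List String)) (max_skills total_count : Int)
    (acc : List String) : Int × List String :=
  match groups with
  | [] => (total_count, acc)
  | g :: rest =>
    if g = [] then fmtLoopA rest max_skills total_count acc
    else
      let remaining_budget := max_skills - total_count
      if remaining_budget ≤ 0 then (total_count, acc)
      else if (g.length : Int) ≤ remaining_budget then
        fmtLoopA rest max_skills (total_count + (g.length : Int))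
          (acc ++ [PySem.Str.join " or " g])
      else
        (total_count + remaining_budget,
         acc ++ [PySem.Str.join " or " (PySem.List.slice g none (some remaining_budget))])

def format_2d_skills_py (skills : List (List String)) (max_skills : Int) : String :=
  if skills = [] then ""
  else
    let r := fmtLoopA skills max_skills 0 []
    let result := PySem.Str.join ", " r.2
    let total_all : Int := skills.foldl (fun a g => a + (g.length : Int)) 0
    if max_skills < total_all then
      result ++ " ... and " ++ PySem.Int.toStr (total_all - r.1) ++ " more"
    else result

-- ===== PORT B =====
-- Source B's run-splitting while-loop: pop the maximal prefix sharing the head's key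
def groupRunsB : List (Int × String) → List (List String)
  | [] => []
  | p :: rest =>
    ((p :: rest).takeWhile (fun q => q.1 == p.1)).map (·.2)
      :: groupRunsB ((p :: rest).dropWhile (fun q => q.1 == p.1))
  termination_by l => l.length
  decreasing_by
    simp only [List.dropWhile_cons, beq_self_eq_true, if_true, List.length_cons]
    exact Nat.lt_succ_of_le (List.length_dropWhile_le _ _)

def format_2d_skills_py_alt (skills : List (List String)) (max_skills : Int) : String :=
  if skills = [] then ""
  else
    let flat := (PySem.List.enumerate skills 0).flatMap (fun p => p.2.map (fun s => (p.1, s)))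
    let shown := PySem.List.slice flat none (some (max 0 max_skills))
    let runs := groupRunsB shown
    let result := PySem.Str.join ", " (runs.map (PySem.Str.join " or "))
    if max_skills < (flat.length : Int) then
      result ++ " ... and " ++ PySem.Int.toStr ((flat.length : Int) - (shown.length : Int)) ++ " more"
    else result

-- ===== PRECONDITION & SPEC =====
def Spec_format_2d_skills_py (skills : List (List String)) (max_skills : Int) (out : String) : Prop := out = format_2d_skills_py_alt skills max_skills
instance (skills : List (List String)) (max_skills : Int) (out : String) : Decidable (Spec_format_2d_skills_py skills max_skills out) := by unfold Spec_format_2d_skills_py; infer_instance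

-- ===== CLAIM (what is proved, stated in full; the proofs are below) =====
def Claim_equal_format_2d_skills_py : Prop := ∀ (skills : List (List String)) (max_skills : Int), Dom_format_2d_skills_py skills max_skills → Spec_format_2d_skills_py skills max_skills (format_2d_skills_py skills max_skills)

-- ===== LEMMAS AND PROOFS =====

-- the flat pair list starting at group index n (B uses n = 0)
def flatFrom (n : Int) (groups : List (List String)) : List (Int × String) :=
  (PySem.List.enumerate groups n).flatMap (fun p => p.2.map (fun s => (p.1, s)))

lemma flatFrom_nil (n : Int) : flatFrom n [] = [] := rfl

lemma flatFrom_cons (n : Int) (g : List String) (rest : List (List String)) :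
    flatFrom n (g :: rest) = g.map (fun s => (n, s)) ++ flatFrom (n + 1) rest := by
  simp [flatFrom, PySem.List.enumerate_cons]

lemma flatFrom_keys (n : Int) (groups : List (List String)) :
    ∀ q ∈ flatFrom n groups, n ≤ q.1 := by
  induction groups generalizing n with
  | nil => simp [flatFrom_nil]
  | cons g rest ih =>
    intro q hq
    rw [flatFrom_cons] at hq
    rcases List.mem_append.1 hq with h | h
    · rcases List.mem_map.1 h with ⟨s, _, rfl⟩; exact le_refl n
    · have := ih (n + 1) q h; omega

lemma length_flatFrom (n : Int) (groups : List (List String)) :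
    (flatFrom n groups).length = (groups.map List.length).sum := by
  induction groups generalizing n with
  | nil => simp [flatFrom_nil]
  | cons g rest ih => simp [flatFrom_cons, ih]

lemma groupRunsB_same_key (g : List String) (hg : g ≠ []) (n : Int)
    (T : List (Int × String)) (hT : ∀ q ∈ T, q.1 ≠ n) :
    groupRunsB (g.map (fun s => (n, s)) ++ T) = g :: groupRunsB T := by
  obtain ⟨s, g', rfl⟩ := List.exists_cons_of_ne_nil hg
  have htw : ∀ (l : List String), List.takeWhile (fun q => q.1 == n) (l.map (fun s => (n, s)) ++ T)
      = l.map (fun s => (n, s)) := by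
    intro l
    induction l with
    | nil =>
      cases T with
      | nil => simp
      | cons t ts =>
        simp only [List.map_nil, List.nil_append, List.takeWhile_cons]
        have : (t.1 == n) = false := by
          simpa using hT t (List.mem_cons_self ..)
        simp [this]
    | cons x xs ih => simp [ih]
  have hdw : ∀ (l : List String), List.dropWhile (fun q => q.1 == n) (l.map (fun s => (n, s)) ++ T)
      = T := by
    intro l
    induction l with
    | nil =>
      cases T with
      | nil => simp
      | cons t ts =>
        simp only [List.map_nil, List.nil_append, List.dropWhile_cons]
        have : (t.1 == n) = false := by
          simpa using hT t (List.mem_cons_self ..)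
        simp [this]
    | cons x xs ih => simp [ih]
  rw [groupRunsB.eq_def]
  have h1 := htw (s :: g')
  have h2 := hdw (s :: g')
  simp only [List.map_cons, List.cons_append] at h1 h2 ⊢
  rw [h1, h2]
  simp

lemma groupRunsB_nil : groupRunsB [] = [] := by rw [groupRunsB]

lemma sum_lens_nonneg (groups : List (List String)) : 0 ≤ ((groups.map List.length).sum : Int) := by
  positivity

-- main loop invariant: A's loop = (count, joined runs of the flat slice)
lemma fmtLoopA_eq (groups : List (List String)) (ms : Int) :
    ∀ (tc : Int) (acc : List String) (n : Int),
    fmtLoopA groups ms tc acc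
      = (tc + min (max 0 (ms - tc)) ((groups.map List.length).sum : Int),
         acc ++ (groupRunsB ((flatFrom n groups).take (max 0 (ms - tc)).toNat)).map
                  (PySem.Str.join " or ")) := by
  induction groups with
  | nil =>
    intro tc acc n
    simp [fmtLoopA, flatFrom_nil, groupRunsB_nil]
  | cons g rest ih =>
    intro tc acc n
    have hS := sum_lens_nonneg rest
    by_cases hg : g = []
    · subst hg
      rw [fmtLoopA, if_pos rfl, ih tc acc (n + 1), flatFrom_cons]
      simp
    · rw [fmtLoopA, if_neg hg]
      simp only []
      by_cases hb : ms - tc ≤ 0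
      · rw [if_pos hb]
        have h0 : max 0 (ms - tc) = 0 := by omega
        rw [h0]
        simp only [Int.toNat_zero, List.take_zero, groupRunsB_nil, List.map_nil,
          List.append_nil, Prod.mk.injEq]
        refine ⟨?_, trivial⟩
        have := sum_lens_nonneg (g :: rest)
        simp only [List.map_cons, List.sum_cons] at this ⊢
        push_cast at this ⊢
        omega
      · rw [if_neg hb]
        have hbpos : 0 < ms - tc := by omega
        have hmax : max 0 (ms - tc) = ms - tc := by omega
        have hkeys : ∀ q ∈ flatFrom (n + 1) rest, q.1 ≠ n := by
          intro q hq; have := flatFrom_keys (n + 1) rest q hq; omega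
        by_cases hfit : (g.length : Int) ≤ ms - tc
        · rw [if_pos hfit, ih (tc + g.length) (acc ++ [PySem.Str.join " or " g]) (n + 1)]
          have htake : (flatFrom n (g :: rest)).take (max 0 (ms - tc)).toNat
              = g.map (fun s => (n, s))
                ++ (flatFrom (n + 1) rest).take (max 0 (ms - (tc + g.length))).toNat := by
            rw [flatFrom_cons, List.take_append]
            congr 1
            · apply List.take_of_length_le; simp; omega
            · congr 1; simp; omega
          rw [htake, groupRunsB_same_key g hg n _
                (by intro q hq; exact hkeys q (List.take_subset _ _ hq))]
          rw [Prod.mk.injEq]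
          constructor
          · simp only [List.map_cons, List.sum_cons]
            push_cast
            push_cast at hS
            omega
          · simp
        · rw [if_neg hfit]
          have hlt : ms - tc < (g.length : Int) := by omega
          have htake : (flatFrom n (g :: rest)).take (max 0 (ms - tc)).toNat
              = (g.take (ms - tc).toNat).map (fun s => (n, s)) := by
            rw [flatFrom_cons, List.take_append]
            have h2 : (max 0 (ms - tc)).toNat - (g.map (fun s => (n, s))).length = 0 := by
              simp; omega
            rw [h2, List.take_zero, List.append_nil, hmax, List.map_take]
          have hne : g.take (ms - tc).toNat ≠ [] := by
            have : 0 < (g.take (ms - tc).toNat).length := by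
              simp; constructor <;> omega
            exact List.ne_nil_of_length_pos this
          rw [htake]
          have hruns := groupRunsB_same_key _ hne n [] (by simp)
          simp only [List.append_nil] at hruns
          rw [hruns, groupRunsB_nil]
          have hslice : PySem.List.slice g none (some (ms - tc)) = g.take (ms - tc).toNat :=
            PySem.List.slice_to g (le_of_lt hbpos)
          rw [Prod.mk.injEq, hslice]
          constructor
          · simp only [List.map_cons, List.sum_cons]
            push_cast
            push_cast at hS
            omega
          · simp

lemma foldl_sum_lens (groups : List (List String)) :
    groups.foldl (fun a g => a + (g.length : Int)) 0 = ((groups.map List.length).sum : Int) := by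
  have h : ∀ (l : List (List String)) (a : Int),
      l.foldl (fun a g => a + (g.length : Int)) a = a + ((l.map List.length).sum : Int) := by
    intro l
    induction l with
    | nil => simp
    | cons g rest ih => intro a; simp [List.foldl_cons, ih]; ring
  simpa using h groups 0

-- ===== VERDICT (by name: the statement is the Claim_ definition above) =====
theorem format_2d_skills_py_spec : Claim_equal_format_2d_skills_py := by
  intro skills ms _
  unfold Spec_format_2d_skills_py format_2d_skills_py format_2d_skills_py_alt
  by_cases h : skills = []
  · simp [h]
  · rw [if_neg h, if_neg h]
    have hflat : (PySem.List.enumerate skills 0).flatMap (fun p => p.2.map (fun s => (p.1, s)))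
        = flatFrom 0 skills := rfl
    have hshown : PySem.List.slice (flatFrom 0 skills) none (some (max 0 ms))
        = (flatFrom 0 skills).take (max 0 ms).toNat :=
      PySem.List.slice_to _ (le_max_left 0 ms)
    have hloop := fmtLoopA_eq skills ms 0 [] 0
    simp only [sub_zero, zero_add] at hloop
    have hlen := length_flatFrom 0 skills
    have hS := sum_lens_nonneg skills
    simp only [hflat, hshown, hloop, foldl_sum_lens, hlen, List.nil_append]
    by_cases hmore : ms < ((skills.map List.length).sum : Int)
    · rw [if_pos hmore, if_pos hmore]
      have hlenshown : (((flatFrom 0 skills).take (max 0 ms).toNat).length : Int)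
          = min (max 0 ms) ((skills.map List.length).sum : Int) := by
        simp only [List.length_take, hlen]
        push_cast
        omega
      rw [hlenshown]
    · rw [if_neg hmore, if_neg hmore]
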